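-- pv_equiv track=rewrite | github.com/yorevs/hspylib | src/main/hspylib/modules/cli/menu/extra/minput/minput_utils.py | toggle_selected
-- ===== SOURCE A (Python) =====
-- def toggle_selected(tokenized_values: str) -> str:
--     values = tokenized_values.split('|')
--     cur_idx = next((idx for idx, val in enumerate(values) if val.find('<') >= 0), -1)
--     if cur_idx < 0:
--         if len(values) > 1:
--             values[1] = f'<{values[1]}>'
--         else:
--             values[0] = f'<{values[0]}>'
--         return '|'.join(values)
--     else:
--         unselected = list(map(lambda x: x.replace('<', '').replace('>', ''), values))
--         # @formatter:off
--         return '|'.join([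
--             f'<{val}>'
--             if
--             idx == (cur_idx + 1)
--             or ((cur_idx + 1) >= len(unselected) and idx == 0)
--             else
--             val
--             for idx, val in enumerate(unselected)
--         ])
-- ===== SOURCE B (Python) =====
-- def toggle_selected(tokenized_values: str) -> str:
--     s = tokenized_values
--     i = s.find('<')
--     if i < 0:
--         strip = False
--         target = 1 if '|' in s else 0
--     else:
--         strip = True
--         target = (s[:i].count('|') + 1) % (s.count('|') + 1)
--     out = ['<'] if target == 0 else []
--     t = 0
--     for c in s:
--         if strip and c in '<>':
--             continue
--         if c == '|':
--             if t == target: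
--                 out.append('>')
--             t += 1
--             out.append('|')
--             if t == target:
--                 out.append('<')
--         else:
--             out.append(c)
--     if t == target:
--         out.append('>')
--     return ''.join(out)
-- ===== Notes on version B (the rewrite author's own statement) =====
-- stated objective: alternative
-- what changed: B never builds a token list: it derives the single target token index arithmetically from character counts (pipes before the first opening marker, modulo total pipes plus one) and then rewrites the string in one character-level scan that skips marker characters and inserts the markers at token boundaries, whereas A splits into a list, maps a strip over it and re-joins a per-element conditional comprehension.
import Mathlib
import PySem

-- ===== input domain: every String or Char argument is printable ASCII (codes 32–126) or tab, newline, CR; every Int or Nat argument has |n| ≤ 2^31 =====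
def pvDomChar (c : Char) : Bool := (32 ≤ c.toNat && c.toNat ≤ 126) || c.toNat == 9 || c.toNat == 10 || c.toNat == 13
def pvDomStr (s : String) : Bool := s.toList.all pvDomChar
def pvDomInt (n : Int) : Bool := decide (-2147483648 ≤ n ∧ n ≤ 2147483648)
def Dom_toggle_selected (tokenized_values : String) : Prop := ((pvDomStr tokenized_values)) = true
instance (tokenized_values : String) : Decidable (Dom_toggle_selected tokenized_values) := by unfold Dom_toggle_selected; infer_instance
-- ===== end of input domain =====

-- B never builds a token list: it derives the target token index from character
-- counts and rewrites the string in a single character-level scan (objective: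
-- alternative decomposition, same cost); both programs are total and agree everywhere.

-- ===== PORT A =====
-- next((idx for idx, val in enumerate(values) if val.find('<') >= 0), -1)
def pvFirstMarkedA : List (Int × List Char) → Int
  | [] => -1
  | (idx, val) :: rest => if 0 ≤ PySem.Chars.find val ['<'] then idx else pvFirstMarkedA rest

def toggle_selected (tokenized_values : String) : String :=
  let values := PySem.Chars.splitOn tokenized_values.toList ['|']
  let cur_idx := pvFirstMarkedA (PySem.List.enumerate values)
  if cur_idx < 0 then
    let values' :=
      if values.length > 1 then
        PySem.List.pySetD values 1 ('<' :: PySem.List.pyGetD values 1 [] ++ ['>'])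
      else
        PySem.List.pySetD values 0 ('<' :: PySem.List.pyGetD values 0 [] ++ ['>'])
    String.ofList (PySem.Chars.join ['|'] values')
  else
    let unselected := values.map (fun x => PySem.Chars.replace (PySem.Chars.replace x ['<'] []) ['>'] [])
    String.ofList (PySem.Chars.join ['|']
      ((PySem.List.enumerate unselected).map (fun p =>
        if p.1 = cur_idx + 1 ∨ (cur_idx + 1 ≥ (unselected.length : Int) ∧ p.1 = 0)
        then '<' :: p.2 ++ ['>'] else p.2)))

-- ===== PORT B =====
-- the body of Source B's for-loop over the characters (state: token counter, output)
def pvScanStep (strip : Bool) (target : Nat) (st : Nat × List Char) (c : Char) : Nat × List Char :=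
  if strip && (c == '<' || c == '>') then st
  else if c = '|' then
    let out := if st.1 = target then st.2 ++ ['>'] else st.2
    let t := st.1 + 1
    (t, (out ++ ['|']) ++ (if t = target then ['<'] else []))
  else (st.1, st.2 ++ [c])

def toggle_selected_alt (tokenized_values : String) : String :=
  let cs := tokenized_values.toList
  let i := PySem.Chars.find cs ['<']
  let p : Bool × Nat :=
    if i < 0 then
      (false, if PySem.Chars.isIn ['|'] cs then 1 else 0)
    else
      (true, (PySem.Chars.count (PySem.List.slice cs none (some i)) ['|'] + 1)
               % (PySem.Chars.count cs ['|'] + 1))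
  let strip := p.1
  let target := p.2
  let init : List Char := if target = 0 then ['<'] else []
  let r := cs.foldl (pvScanStep strip target) (0, init)
  String.ofList (r.2 ++ (if r.1 = target then ['>'] else []))

-- ===== PRECONDITION & SPEC =====
def Spec_toggle_selected (tokenized_values : String) (out : String) : Prop := out = toggle_selected_alt tokenized_values
instance (tokenized_values : String) (out : String) : Decidable (Spec_toggle_selected tokenized_values out) := by unfold Spec_toggle_selected; infer_instance

-- ===== CLAIM (what is proved, stated in full; the proofs are below) =====
def Claim_equal_toggle_selected : Prop := ∀ (tokenized_values : String), Dom_toggle_selected tokenized_values → Spec_toggle_selected tokenized_values (toggle_selected tokenized_values)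

-- ===== LEMMAS AND PROOFS =====

-- proof-side model of splitting on '|'
def pvSplit : List Char → List Char → List (List Char)
  | pre, [] => [pre]
  | pre, c :: t => if c = '|' then pre :: pvSplit [] t else pvSplit (pre ++ [c]) t

theorem pvSplit_ne_nil (l pre : List Char) : pvSplit pre l ≠ [] := by
  induction l generalizing pre with
  | nil => simp [pvSplit]
  | cons c t ih => rw [pvSplit]; split <;> simp [ih]

theorem splitOn_go_eq (l : List Char) : ∀ (fuel : Nat) (cur : List Char) (acc : List (List Char)),
    l.length < fuel →
    PySem.Chars.splitOn.go ['|'] fuel l cur acc = acc.reverse ++ pvSplit cur.reverse l := by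
  induction l with
  | nil =>
    intro fuel cur acc h
    cases fuel with
    | zero => omega
    | succ n => simp [PySem.Chars.splitOn.go, pvSplit]
  | cons c t ih =>
    intro fuel cur acc h
    cases fuel with
    | zero => omega
    | succ n =>
      rw [PySem.Chars.splitOn.go]
      have hp : List.isPrefixOf ['|'] (c :: t) = ('|' == c) := by simp [List.isPrefixOf]
      rw [hp]
      by_cases hc : c = '|'
      · subst hc
        rw [if_pos (by simp)]
        rw [show List.drop ['|'].length ('|' :: t) = t from rfl]
        rw [ih n [] (cur.reverse :: acc) (by simpa using h)]
        simp [pvSplit]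
      · rw [if_neg (by simp [Ne.symm hc])]
        rw [ih n (c :: cur) acc (by simpa using h)]
        simp [pvSplit, hc]

theorem splitOn_eq (cs : List Char) : PySem.Chars.splitOn cs ['|'] = pvSplit [] cs := by
  unfold PySem.Chars.splitOn
  rw [splitOn_go_eq cs (cs.length + 1) [] [] (by omega)]
  simp

theorem join_pvSplit (l : List Char) : ∀ pre, PySem.Chars.join ['|'] (pvSplit pre l) = pre ++ l := by
  induction l with
  | nil => intro pre; simp [pvSplit, PySem.Chars.join_singleton]
  | cons c t ih =>
    intro pre
    rw [pvSplit]
    by_cases hc : c = '|'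
    · subst hc
      rw [if_pos rfl]
      obtain ⟨h, t', ht⟩ : ∃ h t', pvSplit [] t = h :: t' := by
        cases hx : pvSplit [] t with
        | nil => exact absurd hx (pvSplit_ne_nil t [])
        | cons a b => exact ⟨a, b, rfl⟩
      rw [ht, PySem.Chars.join_cons_cons, ← ht, ih]
      simp
    · rw [if_neg hc, ih]
      simp

theorem pvSplit_free (l : List Char) : ∀ pre, '|' ∉ pre → ∀ v ∈ pvSplit pre l, '|' ∉ v := by
  induction l with
  | nil =>
    intro pre hp v hv
    rw [pvSplit, List.mem_singleton] at hv
    subst hv; exact hp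
  | cons c t ih =>
    intro pre hp v hv
    rw [pvSplit] at hv
    by_cases hc : c = '|'
    · subst hc
      rw [if_pos rfl] at hv
      rcases List.mem_cons.mp hv with hv | hv
      · subst hv; exact hp
      · exact ih [] (by simp) v hv
    · rw [if_neg hc] at hv
      refine ih (pre ++ [c]) ?_ v hv
      simp only [List.mem_append, List.mem_singleton]
      rintro (h | h)
      · exact hp h
      · exact hc h.symm

-- count.go on a single-character needle is List.count
theorem count_go_eq (l : List Char) : ∀ (fuel acc : Nat), l.length ≤ fuel →
    PySem.Chars.count.go ['|'] fuel l acc = acc + l.count '|' := by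
  induction l with
  | nil =>
    intro fuel acc h
    cases fuel <;> simp [PySem.Chars.count.go]
  | cons c t ih =>
    intro fuel acc h
    cases fuel with
    | zero => simp at h
    | succ n =>
      rw [PySem.Chars.count.go]
      have hp : List.isPrefixOf ['|'] (c :: t) = ('|' == c) := by simp [List.isPrefixOf]
      rw [hp]
      by_cases hc : c = '|'
      · subst hc
        rw [if_pos (by simp)]
        rw [show List.drop ['|'].length ('|' :: t) = t from rfl]
        rw [ih n (acc + 1) (by simpa using h)]
        simp
        omega
      · rw [if_neg (by simp [Ne.symm hc])]
        rw [ih n acc (by simpa using h)]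
        simp [hc]

theorem count_single (l : List Char) : PySem.Chars.count l ['|'] = l.count '|' := by
  unfold PySem.Chars.count
  rw [if_neg (by simp)]
  simpa using count_go_eq l l.length 0 le_rfl

-- membership in a '|'-join
theorem mem_join_iff (c : Char) (hc : c ≠ '|') : ∀ ts : List (List Char), ts ≠ [] →
    (c ∈ PySem.Chars.join ['|'] ts ↔ ∃ v ∈ ts, c ∈ v) := by
  intro ts
  induction ts with
  | nil => intro h; exact absurd rfl h
  | cons v rest ih =>
    intro _
    cases rest with
    | nil => simp [PySem.Chars.join_singleton]
    | cons w r =>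
      rw [PySem.Chars.join_cons_cons]
      rw [show v ++ ['|'] ++ PySem.Chars.join ['|'] (w :: r)
            = v ++ ('|' :: PySem.Chars.join ['|'] (w :: r)) by simp]
      have hr := ih (by simp)
      constructor
      · intro h
        rcases List.mem_append.mp h with h | h
        · exact ⟨v, by simp, h⟩
        · rcases List.mem_cons.mp h with h | h
          · exact absurd h hc
          · obtain ⟨u, hu, hcu⟩ := hr.mp h
            exact ⟨u, List.mem_cons_of_mem _ hu, hcu⟩
      · rintro ⟨u, hu, hcu⟩
        rcases List.mem_cons.mp hu with hu | hu
        · subst hu; exact List.mem_append.mpr (Or.inl hcu)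
        · exact List.mem_append.mpr (Or.inr (List.mem_cons_of_mem _ (hr.mpr ⟨u, hu, hcu⟩)))

theorem bar_mem_join (ts : List (List Char)) (hne : ts ≠ []) (hfree : ∀ v ∈ ts, '|' ∉ v) :
    ('|' ∈ PySem.Chars.join ['|'] ts ↔ 1 < ts.length) := by
  cases ts with
  | nil => exact absurd rfl hne
  | cons v rest =>
    cases rest with
    | nil =>
      simp [PySem.Chars.join_singleton]
      exact hfree v (by simp)
    | cons w r =>
      rw [PySem.Chars.join_cons_cons]
      simp

theorem count_join (ts : List (List Char)) (hne : ts ≠ []) (hfree : ∀ v ∈ ts, '|' ∉ v) :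
    (PySem.Chars.join ['|'] ts).count '|' = ts.length - 1 := by
  induction ts with
  | nil => exact absurd rfl hne
  | cons v rest ih =>
    cases rest with
    | nil => simp [PySem.Chars.join_singleton, List.count_eq_zero.mpr (hfree v (by simp))]
    | cons w r =>
      rw [PySem.Chars.join_cons_cons]
      have h1 : v.count '|' = 0 := List.count_eq_zero.mpr (hfree v (by simp))
      have h2 := ih (by simp) (fun u hu => hfree u (by simp [hu]))
      simp [List.count_append, h1, h2]

-- first token containing '<'
def pvFM : List (List Char) → Option Nat
  | [] => none
  | v :: t => if PySem.Chars.isIn ['<'] v then some 0 else (pvFM t).map (· + 1)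

theorem isIn_lt_iff (c : Char) (v : List Char) : PySem.Chars.isIn [c] v = true ↔ c ∈ v := by
  rw [PySem.Chars.isIn_iff_infix, List.singleton_infix_iff]

theorem pvFM_none_iff (ts : List (List Char)) : pvFM ts = none ↔ ∀ v ∈ ts, '<' ∉ v := by
  induction ts with
  | nil => simp [pvFM]
  | cons v t ih =>
    rw [pvFM]
    by_cases h : PySem.Chars.isIn ['<'] v
    · simp [h, (isIn_lt_iff '<' v).mp h]
    · have : '<' ∉ v := fun hm => h ((isIn_lt_iff '<' v).mpr hm)
      simp [h, this, ih]

theorem pvFM_lt (ts : List (List Char)) (k : Nat) (h : pvFM ts = some k) : k < ts.length := by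
  induction ts generalizing k with
  | nil => simp [pvFM] at h
  | cons v t ih =>
    rw [pvFM] at h
    split at h
    · cases h; simp
    · cases hx : pvFM t with
      | none => rw [hx] at h; simp at h
      | some j =>
        rw [hx] at h
        simp at h
        have := ih j hx
        simp
        omega

theorem firstMarkedA_eq (ts : List (List Char)) : ∀ s : Nat,
    pvFirstMarkedA (PySem.List.enumerate ts (s : Int))
      = (match pvFM ts with | none => -1 | some k => ((s + k : Nat) : Int)) := by
  induction ts with
  | nil => intro s; simp [pvFirstMarkedA, pvFM, PySem.List.enumerate_nil]
  | cons v t ih =>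
    intro s
    rw [PySem.List.enumerate_cons]
    simp only [pvFirstMarkedA, pvFM]
    have hiff : (0 ≤ PySem.Chars.find v ['<']) ↔ PySem.Chars.isIn ['<'] v = true := by
      rw [PySem.Chars.find_nonneg_iff, PySem.Chars.isIn_iff_infix]
    by_cases h : PySem.Chars.isIn ['<'] v = true
    · rw [if_pos (hiff.mpr h), if_pos h]; simp
    · rw [if_neg (fun hx => h (hiff.mp hx)), if_neg (by simpa using h)]
      rw [show ((s : Int) + 1) = ((s + 1 : Nat) : Int) by push_cast; ring]
      rw [ih (s + 1)]
      cases hx : pvFM t with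
      | none => simp
      | some j => simp; ring

-- the prefix of cs before the first '<'
theorem take_eq_takeWhile_of (cs : List Char) : ∀ n : Nat, cs[n]? = some '<' →
    (∀ j < n, cs[j]? ≠ some '<') → cs.take n = cs.takeWhile (· ≠ '<') := by
  induction cs with
  | nil => intro n hget _; simp at hget
  | cons a t ih =>
    intro n hget hlt
    cases n with
    | zero =>
      simp at hget
      simp [hget]
    | succ m =>
      have ha : a ≠ '<' := by
        have := hlt 0 (by omega)
        simpa using this
      rw [List.take_succ_cons, List.takeWhile_cons_of_pos (by simpa using ha)]
      rw [ih m (by simpa using hget) (fun j hj => by simpa using hlt (j + 1) (by omega))]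

theorem take_find_eq_takeWhile (cs : List Char) (hmem : '<' ∈ cs) :
    cs.take (PySem.Chars.find cs ['<']).toNat = cs.takeWhile (· ≠ '<') := by
  have h0 : 0 ≤ PySem.Chars.find cs ['<'] := by
    rw [PySem.Chars.find_nonneg_iff, List.singleton_infix_iff]; exact hmem
  obtain ⟨hpre, hmin⟩ := PySem.Chars.find_spec h0
  apply take_eq_takeWhile_of
  · rcases hpre with ⟨t, ht⟩
    rw [← List.head?_drop, ← ht]
    rfl
  · intro j hj hc
    apply hmin j hj
    rw [← List.head?_drop] at hc
    cases hd : cs.drop j with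
    | nil => rw [hd] at hc; simp at hc
    | cons a b =>
      rw [hd] at hc
      simp at hc
      subst hc
      exact ⟨b, by simp⟩

theorem takeWhile_count_eq_pvFM (ts : List (List Char)) (hne : ts ≠ [])
    (hfree : ∀ v ∈ ts, '|' ∉ v) (k : Nat) (hk : pvFM ts = some k) :
    ((PySem.Chars.join ['|'] ts).takeWhile (· ≠ '<')).count '|' = k := by
  induction ts generalizing k with
  | nil => exact absurd rfl hne
  | cons v rest ih =>
    by_cases hv : '<' ∈ v
    · have hk0 : k = 0 := by
        rw [pvFM, if_pos ((isIn_lt_iff '<' v).mpr hv)] at hk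
        cases hk; rfl
      subst hk0
      have hsub : ((PySem.Chars.join ['|'] (v :: rest)).takeWhile (· ≠ '<')).count '|' = 0 := by
        have hj : ∃ r, PySem.Chars.join ['|'] (v :: rest) = v ++ r := by
          cases rest with
          | nil => exact ⟨[], by simp [PySem.Chars.join_singleton]⟩
          | cons w r => exact ⟨'|' :: PySem.Chars.join ['|'] (w :: r), by rw [PySem.Chars.join_cons_cons]; simp⟩
        obtain ⟨r, hr⟩ := hj
        rw [hr, List.takeWhile_append]
        have htv : (v.takeWhile (· ≠ '<')).length ≠ v.length := by
          intro hlen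
          have : v.takeWhile (· ≠ '<') = v :=
            (List.takeWhile_prefix _).eq_of_length hlen
          have := List.takeWhile_eq_self_iff.mp this '<' hv
          simp at this
        rw [if_neg htv]
        apply List.count_eq_zero.mpr
        intro hmem
        exact hfree v (by simp) ((List.takeWhile_prefix _).subset hmem)
      exact hsub
    · have hrest : ∃ j, pvFM rest = some j ∧ k = j + 1 := by
        rw [pvFM, if_neg (fun hx => hv ((isIn_lt_iff '<' v).mp hx))] at hk
        cases hx : pvFM rest with
        | none => rw [hx] at hk; simp at hk
        | some j => rw [hx] at hk; simp at hk; exact ⟨j, rfl, hk.symm⟩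
      obtain ⟨j, hj, hkj⟩ := hrest
      have hrne : rest ≠ [] := by intro h; rw [h] at hj; simp [pvFM] at hj
      obtain ⟨w, r, hw⟩ : ∃ w r, rest = w :: r := by
        cases rest with
        | nil => exact absurd rfl hrne
        | cons w r => exact ⟨w, r, rfl⟩
      subst hw
      rw [PySem.Chars.join_cons_cons]
      have hvall : v.takeWhile (· ≠ '<') = v :=
        List.takeWhile_eq_self_iff.mpr (fun c hc => by simp; intro h; exact hv (h ▸ hc))
      rw [show v ++ ['|'] ++ PySem.Chars.join ['|'] (w :: r) = v ++ ('|' :: PySem.Chars.join ['|'] (w :: r)) by simp]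
      rw [List.takeWhile_append, hvall, if_pos rfl]
      rw [List.takeWhile_cons_of_pos (by simp)]
      have h1 : v.count '|' = 0 := List.count_eq_zero.mpr (hfree v (by simp))
      rw [List.count_append, h1, List.count_cons]
      rw [ih (by simp) (fun u hu => hfree u (by simp [hu])) j hj]
      simp [hkj]

-- ---- the character scan over a '|'-join ----

def pvStf (strip : Bool) (v : List Char) : List Char :=
  if strip then v.filter (fun c => !(c == '<' || c == '>')) else v

theorem scan_token (strip : Bool) (target : Nat) (v : List Char) (hfree : '|' ∉ v) :
    ∀ (t : Nat) (out : List Char),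
    v.foldl (pvScanStep strip target) (t, out) = (t, out ++ pvStf strip v) := by
  induction v with
  | nil => intro t out; cases strip <;> simp [pvStf]
  | cons c w ih =>
    intro t out
    have hc : c ≠ '|' := fun h => hfree (by simp [h])
    have hw : '|' ∉ w := fun h => hfree (by simp [h])
    rw [List.foldl_cons]
    by_cases hs : strip
    · by_cases hm : c = '<' ∨ c = '>'
      · rw [show pvScanStep strip target (t, out) c = (t, out) by
          unfold pvScanStep; rw [if_pos (by rcases hm with h | h <;> simp [hs, h])]]
        rw [ih hw t out]
        simp [pvStf, hs, List.filter_cons]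
        rcases hm with h | h <;> simp [h]
      · have h1 : ¬ c = '<' := fun h => hm (Or.inl h)
        have h2 : ¬ c = '>' := fun h => hm (Or.inr h)
        rw [show pvScanStep strip target (t, out) c = (t, out ++ [c]) by
          unfold pvScanStep
          rw [if_neg (by simp [h1, h2]), if_neg hc]]
        rw [ih hw t (out ++ [c])]
        simp [pvStf, hs, h1, h2]
    · rw [show pvScanStep strip target (t, out) c = (t, out ++ [c]) by
        unfold pvScanStep; rw [if_neg (by simp [hs]), if_neg hc]]
      rw [ih hw t (out ++ [c])]
      simp [pvStf, hs]

def pvBd (stf : List Char → List Char) (target : Nat) : Nat → List (List Char) → List Char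
  | _, [] => []
  | _, [v] => stf v
  | t0, v :: w :: r =>
      stf v ++ (if t0 = target then ['>'] else []) ++
        '|' :: ((if t0 + 1 = target then ['<'] else []) ++ pvBd stf target (t0 + 1) (w :: r))

theorem scan_join (strip : Bool) (target : Nat) (ts : List (List Char)) (hne : ts ≠ [])
    (hfree : ∀ v ∈ ts, '|' ∉ v) : ∀ (t0 : Nat) (out : List Char),
    (PySem.Chars.join ['|'] ts).foldl (pvScanStep strip target) (t0, out)
      = (t0 + (ts.length - 1), out ++ pvBd (pvStf strip) target t0 ts) := by
  induction ts with
  | nil => exact absurd rfl hne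
  | cons v rest ih =>
    intro t0 out
    cases rest with
    | nil =>
      rw [PySem.Chars.join_singleton]
      rw [scan_token strip target v (hfree v (by simp)) t0 out]
      simp [pvBd]
    | cons w r =>
      rw [PySem.Chars.join_cons_cons]
      rw [show v ++ ['|'] ++ PySem.Chars.join ['|'] (w :: r)
            = v ++ ('|' :: PySem.Chars.join ['|'] (w :: r)) by simp]
      rw [List.foldl_append]
      rw [scan_token strip target v (hfree v (by simp)) t0 out]
      rw [List.foldl_cons]
      rw [show pvScanStep strip target (t0, out ++ pvStf strip v) '|'
            = (t0 + 1, ((if t0 = target then (out ++ pvStf strip v) ++ ['>'] else out ++ pvStf strip v) ++ ['|'])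
                ++ (if t0 + 1 = target then ['<'] else [])) by
        unfold pvScanStep
        rw [if_neg (by simp), if_pos rfl]]
      rw [ih (by simp) (fun u hu => hfree u (by simp [hu])) (t0 + 1) _]
      rw [Prod.mk.injEq]
      refine ⟨by simp; omega, ?_⟩
      show _ = out ++ pvBd (pvStf strip) target t0 (v :: w :: r)
      rw [pvBd]
      split_ifs <;> simp

def pvMw (stf : List Char → List Char) (target : Nat) : Nat → List (List Char) → List (List Char)
  | _, [] => []
  | t0, v :: rest =>
      (if t0 = target then '<' :: stf v ++ ['>'] else stf v) :: pvMw stf target (t0 + 1) rest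

theorem bd_mw (stf : List Char → List Char) (target : Nat) (ts : List (List Char)) (hne : ts ≠ []) :
    ∀ t0 : Nat,
    (if t0 = target then ['<'] else []) ++ pvBd stf target t0 ts
        ++ (if t0 + (ts.length - 1) = target then ['>'] else [])
      = PySem.Chars.join ['|'] (pvMw stf target t0 ts) := by
  induction ts with
  | nil => exact absurd rfl hne
  | cons v rest ih =>
    intro t0
    cases rest with
    | nil =>
      rw [pvBd, pvMw, pvMw, PySem.Chars.join_singleton]
      simp
      split <;> simp
    | cons w r =>
      rw [pvBd, pvMw]
      obtain ⟨a, ts', hts⟩ : ∃ a ts', pvMw stf target (t0 + 1) (w :: r) = a :: ts' := by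
        rw [pvMw]; exact ⟨_, _, rfl⟩
      rw [hts, PySem.Chars.join_cons_cons, ← hts]
      rw [← ih (by simp) (t0 + 1)]
      have hlen : t0 + ((w :: r).length + 1 - 1) = (t0 + 1) + ((w :: r).length - 1) := by
        simp; omega
      rw [List.length_cons, hlen]
      split_ifs <;> simp

theorem mw_out (stf : List Char → List Char) (target : Nat) (ts : List (List Char)) :
    ∀ t0 : Nat, target < t0 → pvMw stf target t0 ts = ts.map stf := by
  induction ts with
  | nil => intro t0 _; rfl
  | cons v rest ih =>
    intro t0 h
    rw [pvMw, if_neg (by omega), List.map_cons, ih (t0 + 1) (by omega)]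

theorem mw_set (stf : List Char → List Char) (target : Nat) (ts : List (List Char)) :
    ∀ t0 : Nat, t0 ≤ target → target - t0 < ts.length →
    pvMw stf target t0 ts
      = (ts.map stf).set (target - t0) ('<' :: stf (ts.getD (target - t0) []) ++ ['>']) := by
  induction ts with
  | nil => intro t0 _ h; simp at h
  | cons v rest ih =>
    intro t0 h1 h2
    by_cases he : t0 = target
    · subst he
      rw [pvMw, if_pos rfl, mw_out stf t0 rest (t0 + 1) (by omega)]
      simp
    · have hk : target - t0 = (target - (t0 + 1)) + 1 := by omega
      rw [pvMw, if_neg he, hk]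
      rw [List.map_cons, List.set_cons_succ]
      rw [ih (t0 + 1) (by omega) (by simp at h2; omega)]
      simp

-- strip: two replaces are one filter
theorem replace_go_filter (c : Char) (fuel : Nat) (l acc : List Char)
    (h : l.length ≤ fuel) :
    PySem.Chars.replace.go [c] [] fuel l acc = acc.reverse ++ l.filter (fun a => a ≠ c) := by
  induction fuel generalizing l acc with
  | zero =>
    have : l = [] := by cases l <;> simp_all
    subst this; simp [PySem.Chars.replace.go]
  | succ n ih =>
    cases l with
    | nil => simp [PySem.Chars.replace.go]
    | cons a t =>
      rw [PySem.Chars.replace.go]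
      have hp : List.isPrefixOf [c] (a :: t) = (c == a) := by simp [List.isPrefixOf]
      rw [hp]
      rcases eq_or_ne c a with hc | hc
      · subst hc
        rw [if_pos (by simp)]
        rw [show List.drop [c].length (c :: t) = t from rfl]
        rw [ih t ([].reverse ++ acc) (by simpa using h)]
        simp
      · rw [if_neg (by simp [hc])]
        rw [ih t (a :: acc) (by simpa using h)]
        simp [Ne.symm hc]

theorem replace_single_empty (c : Char) (s : List Char) :
    PySem.Chars.replace s [c] [] = s.filter (fun a => a ≠ c) := by
  unfold PySem.Chars.replace
  rw [if_neg (by simp)]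
  exact replace_go_filter c s.length s [] le_rfl

theorem strip_eq_filter (x : List Char) :
    PySem.Chars.replace (PySem.Chars.replace x ['<'] []) ['>'] [] = pvStf true x := by
  rw [replace_single_empty, replace_single_empty, pvStf, if_pos rfl, List.filter_filter]
  congr 1
  funext a
  by_cases h1 : a = '<' <;> by_cases h2 : a = '>' <;> simp [h1, h2]

-- A's enumerate-comprehension in the marked branch is a single set at (cur+1) % len
theorem enum_wrap (cur : Nat) (xs : List (List Char)) (hcur : cur < xs.length) :
    (PySem.List.enumerate xs).map (fun p =>
        if p.1 = (cur : Int) + 1 ∨ ((cur : Int) + 1 ≥ (xs.length : Int) ∧ p.1 = 0)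
        then '<' :: p.2 ++ ['>'] else p.2)
      = xs.set ((cur + 1) % xs.length)
          ('<' :: xs.getD ((cur + 1) % xs.length) [] ++ ['>']) := by
  have hlen0 : 0 < xs.length := Nat.lt_of_le_of_lt (Nat.zero_le _) hcur
  have ht : (cur + 1) % xs.length < xs.length := Nat.mod_lt _ hlen0
  apply List.ext_getElem
  · simp [PySem.List.length_enumerate]
  · intro k h1 h2
    have hk : k < xs.length := by simpa using h2
    have henum : (PySem.List.enumerate xs)[k]'(by simpa [PySem.List.length_enumerate] using hk)
        = ((k : Int), xs[k]) := by
      have := PySem.List.getElem_enumerate (xs := xs) (s := 0) (k := k)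
        (h := by simpa [PySem.List.length_enumerate] using hk)
      simpa using this
    have hgetD : xs.getD ((cur + 1) % xs.length) [] = xs[(cur + 1) % xs.length] := by
      rw [List.getD_eq_getElem?_getD, List.getElem?_eq_getElem ht]; rfl
    have hcond : ((k : Int) = (cur : Int) + 1 ∨ ((cur : Int) + 1 ≥ (xs.length : Int) ∧ (k : Int) = 0))
        ↔ ((cur + 1) % xs.length = k) := by
      rcases Nat.lt_or_ge (cur + 1) xs.length with hlt | hge
      · rw [Nat.mod_eq_of_lt hlt]; omega
      · have hce : cur + 1 = xs.length := by omega
        rw [hce, Nat.mod_self]; omega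
    rw [List.getElem_map, henum, List.getElem_set]
    by_cases hEq : (cur + 1) % xs.length = k
    · subst hEq
      rw [if_pos (hcond.mpr rfl), if_pos rfl, hgetD]
    · rw [if_neg (fun hx => hEq (hcond.mp hx)), if_neg hEq]

theorem getD_map_lt (f : List Char → List Char) (ts : List (List Char)) (n : Nat)
    (h : n < ts.length) : (ts.map f).getD n [] = f (ts.getD n []) := by
  rw [List.getD_eq_getElem?_getD, List.getD_eq_getElem?_getD, List.getElem?_map]
  rw [List.getElem?_eq_getElem h]
  simp

-- ===== VERDICT (by name: the statement is the Claim_ definition above) =====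
theorem toggle_selected_spec : Claim_equal_toggle_selected := by
  intro s _
  unfold Spec_toggle_selected toggle_selected toggle_selected_alt
  simp only [splitOn_eq]
  set cs := s.toList with hcs
  set ts := pvSplit [] cs with hts
  have hne : ts ≠ [] := pvSplit_ne_nil cs []
  have hlen0 : 0 < ts.length := List.length_pos_iff.mpr hne
  have hfree : ∀ v ∈ ts, '|' ∉ v := pvSplit_free cs [] (by simp)
  have hjoin : PySem.Chars.join ['|'] ts = cs := by
    have := join_pvSplit cs []
    simpa using this
  have hmem_iff : ('<' ∈ cs ↔ pvFM ts ≠ none) := by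
    rw [← hjoin, mem_join_iff '<' (by decide) ts hne, Ne, pvFM_none_iff]
    constructor
    · rintro ⟨v, hv, hc⟩ hall; exact hall v hv hc
    · intro h
      by_contra hno
      apply h
      intro v hv hc
      exact hno ⟨v, hv, hc⟩
  have hfind0 : (0 ≤ PySem.Chars.find cs ['<']) ↔ '<' ∈ cs := by
    rw [PySem.Chars.find_nonneg_iff, List.singleton_infix_iff]
  have hA : pvFirstMarkedA (PySem.List.enumerate ts) =
      (match pvFM ts with | none => (-1 : Int) | some k => (k : Int)) := by
    have := firstMarkedA_eq ts 0
    simpa using this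
  cases hFM : pvFM ts with
  | none =>
    have hA' : pvFirstMarkedA (PySem.List.enumerate ts) = -1 := by simp [hA, hFM]
    have hBfind : PySem.Chars.find cs ['<'] < 0 := by
      by_contra h
      exact (hmem_iff.mp (hfind0.mp (Int.not_lt.mp h))) hFM
    rw [hA', if_pos (show (-1 : Int) < 0 by norm_num), if_pos hBfind]
    dsimp only
    have hbar : PySem.Chars.isIn ['|'] cs = true ↔ 1 < ts.length := by
      rw [isIn_lt_iff, ← hjoin]
      exact bar_mem_join ts hne hfree
    set tgt : Nat := if PySem.Chars.isIn ['|'] cs then 1 else 0 with htgt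
    have hscan := scan_join false tgt ts hne hfree 0 (if tgt = 0 then ['<'] else [])
    rw [hjoin] at hscan
    rw [hscan]
    dsimp only
    rw [show (if tgt = 0 then ['<'] else ([] : List Char)) = (if 0 = tgt then ['<'] else []) by
      simp [eq_comm]]
    rw [bd_mw (pvStf false) tgt ts hne 0]
    congr 1
    have hid : ts.map (pvStf false) = ts := by
      rw [show pvStf false = fun v => v from rfl, List.map_id']
    by_cases hlen : ts.length > 1
    · have htgt1 : tgt = 1 := by rw [htgt, if_pos (hbar.mpr hlen)]
      rw [if_pos hlen, htgt1]
      rw [mw_set (pvStf false) 1 ts 0 (by omega) (by omega)]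
      rw [PySem.List.pySetD_of_nonneg _ _ (by norm_num), PySem.List.pyGetD_of_nonneg _ _ (by norm_num)]
      rw [hid]
      norm_num
      rfl
    · have htgt0 : tgt = 0 := by
        rw [htgt, if_neg (fun h => hlen (hbar.mp h))]
      rw [if_neg hlen, htgt0]
      rw [mw_set (pvStf false) 0 ts 0 (by omega) (by omega)]
      rw [PySem.List.pySetD_of_nonneg _ _ (by norm_num), PySem.List.pyGetD_of_nonneg _ _ (by norm_num)]
      rw [hid]
      norm_num
      rfl
  | some k =>
    have hk_lt : k < ts.length := pvFM_lt ts k hFM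
    have hmem : '<' ∈ cs := hmem_iff.mpr (by simp [hFM])
    have h0 : 0 ≤ PySem.Chars.find cs ['<'] := hfind0.mpr hmem
    have hA' : pvFirstMarkedA (PySem.List.enumerate ts) = (k : Int) := by simp [hA, hFM]
    rw [hA', if_neg (show ¬ ((k : Int) < 0) by omega),
        if_neg (show ¬ PySem.Chars.find cs ['<'] < 0 by omega)]
    dsimp only
    have hcount_all : PySem.Chars.count cs ['|'] = ts.length - 1 := by
      rw [count_single, ← hjoin]
      exact count_join ts hne hfree
    have hslice : PySem.List.slice cs none (some (PySem.Chars.find cs ['<']))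
        = cs.takeWhile (· ≠ '<') := by
      rw [PySem.List.slice_to cs h0]
      exact take_find_eq_takeWhile cs hmem
    have hcount_pre : PySem.Chars.count (cs.takeWhile (· ≠ '<')) ['|'] = k := by
      rw [count_single, ← hjoin]
      exact takeWhile_count_eq_pvFM ts hne hfree k hFM
    have htgtv : PySem.Chars.count (PySem.List.slice cs none (some (PySem.Chars.find cs ['<']))) ['|'] + 1
        = k + 1 := by rw [hslice, hcount_pre]
    rw [htgtv, hcount_all, show ts.length - 1 + 1 = ts.length by omega]
    set tgt : Nat := (k + 1) % ts.length with htgt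
    have htlt : tgt < ts.length := Nat.mod_lt _ hlen0
    have hscan := scan_join true tgt ts hne hfree 0 (if tgt = 0 then ['<'] else [])
    rw [hjoin] at hscan
    rw [hscan]
    dsimp only
    rw [show (if tgt = 0 then ['<'] else ([] : List Char)) = (if 0 = tgt then ['<'] else []) by
      simp [eq_comm]]
    rw [bd_mw (pvStf true) tgt ts hne 0]
    congr 1
    rw [mw_set (pvStf true) tgt ts 0 (by omega) (by simpa using htlt)]
    simp only [strip_eq_filter]
    have hmap : ts.map (fun x => pvStf true x) = ts.map (pvStf true) := rfl
    rw [hmap]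
    have hlm : (ts.map (pvStf true)).length = ts.length := List.length_map ..
    rw [enum_wrap k (ts.map (pvStf true)) (by rw [hlm]; exact hk_lt)]
    rw [hlm, ← htgt]
    rw [getD_map_lt (pvStf true) ts tgt htlt]
    simp
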